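-- pv_equiv track=rewrite | github.com/vincetran96/advent-of-code-2020 | day/5/solution.py | get_binary_col
-- ===== SOURCE A (Python) =====
-- def get_middle(lower: int, upper: int) -> int:
--     '''Gets middle number between lower and upper
--
--     Assuming the number of numbers in the range (inclusive)
--     is even
--     '''
--     return lower + int((upper - lower) / 2)
--
-- def get_binary_col(s: str, lower: int = 0, upper: int = 7) -> int:
--     '''Returns the column number based on the binary space partitioning code
--     '''
--     if s == "L":
--         return lower
--     elif s == "R":
--         return upper
--     else:
--         if s[0] == "L":
--             return get_binary_col(s[1:], lower, get_middle(lower, upper))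
--         elif s[0] == "R":
--             return get_binary_col(s[1:], get_middle(lower, upper) + 1, upper)
-- ===== SOURCE B (Python) =====
-- def get_middle(lower: int, upper: int) -> int:
--     return lower + int((upper - lower) / 2)
--
-- def get_binary_col(s: str, lower: int = 0, upper: int = 7) -> int:
--     if s == "L":
--         return lower
--     if s == "R":
--         return upper
--     for c in s[:-1]:
--         if c == "L":
--             upper = get_middle(lower, upper)
--         elif c == "R":
--             lower = get_middle(lower, upper) + 1
--         else:
--             return None
--     last = s[-1]
--     if last == "L":
--         return lower
--     if last == "R":
--         return upper
--     return None
-- ===== Notes on version B (the rewrite author's own statement) =====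
-- stated objective: alternative
-- what changed: Replaces A's recursion (slicing a new string on every step) with a single explicit loop over s[:-1] that narrows a mutable (lower, upper) pair and then reads the last character once.
-- outside the precondition, e.g. on get_binary_col('X', 0, 7): A returns None, B returns None
import Mathlib
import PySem

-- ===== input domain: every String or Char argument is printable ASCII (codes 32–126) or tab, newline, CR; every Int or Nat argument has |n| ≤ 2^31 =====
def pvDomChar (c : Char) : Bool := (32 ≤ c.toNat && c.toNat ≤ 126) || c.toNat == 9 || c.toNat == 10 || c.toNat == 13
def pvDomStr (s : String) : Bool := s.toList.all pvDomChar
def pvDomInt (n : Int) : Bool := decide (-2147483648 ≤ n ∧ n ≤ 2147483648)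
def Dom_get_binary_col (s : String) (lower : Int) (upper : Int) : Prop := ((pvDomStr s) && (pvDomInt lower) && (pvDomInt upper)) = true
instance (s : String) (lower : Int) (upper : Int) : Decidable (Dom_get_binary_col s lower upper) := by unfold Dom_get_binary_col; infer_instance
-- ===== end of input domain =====

-- B replaces A's string-slicing recursion with one explicit loop over all but the last
-- character, narrowing a (lower, upper) pair, then reads the last character (alternative).


-- ===== PORT A =====
-- int((upper - lower) / 2): Python float division then trunc toward zero; exact on Dom's
-- bounded ints (|diff| ≤ 2^33 ≪ 2^53), so Int.tdiv 2 is exact here.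
def get_middle (lower : Int) (upper : Int) : Int := lower + (upper - lower).tdiv 2

def get_binary_col_rec : List Char → Int → Int → Int
  | [], _, _ => 0              -- Python: s[0] raises IndexError (outside Pre_)
  | c :: rest, lower, upper =>
    if c :: rest = ['L'] then lower
    else if c :: rest = ['R'] then upper
    else if c = 'L' then get_binary_col_rec rest lower (get_middle lower upper)
    else if c = 'R' then get_binary_col_rec rest (get_middle lower upper + 1) upper
    else 0                     -- Python: returns None, not an int (outside Pre_)

def get_binary_col (s : String) (lower : Int) (upper : Int) : Int :=
  get_binary_col_rec s.toList lower upper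

-- ===== PORT B =====
-- the for-loop over s[:-1]; none = early `return None` on a non-L/R character
def get_binary_col_loop : List Char → Int → Int → Option (Int × Int)
  | [], lower, upper => some (lower, upper)
  | c :: rest, lower, upper =>
    if c = 'L' then get_binary_col_loop rest lower (get_middle lower upper)
    else if c = 'R' then get_binary_col_loop rest (get_middle lower upper + 1) upper
    else none

def get_binary_col_alt (s : String) (lower : Int) (upper : Int) : Int :=
  let cs := s.toList
  if cs = ['L'] then lower
  else if cs = ['R'] then upper
  else
    match get_binary_col_loop cs.dropLast lower upper with
    | none => 0                -- Python: returns None (outside Pre_)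
    | some (lo, hi) =>
      match cs.getLast? with
      | none => 0              -- Python: s[-1] raises IndexError (outside Pre_)
      | some c => if c = 'L' then lo else if c = 'R' then hi else 0

-- ===== PRECONDITION & SPEC =====
-- Pre_ excludes the empty string (A raises IndexError) and strings with a character other
-- than 'L'/'R' (A returns None, not a value of the declared int type).
def Pre_get_binary_col (s : String) (lower : Int) (upper : Int) : Prop :=
  s.toList ≠ [] ∧ s.toList.all (fun c => c == 'L' || c == 'R') = true
instance (s : String) (lower : Int) (upper : Int) : Decidable (Pre_get_binary_col s lower upper) := by unfold Pre_get_binary_col; infer_instance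

def pvWitness_get_binary_col : String × Int × Int := ("L", 0, 1)

def Spec_get_binary_col (s : String) (lower : Int) (upper : Int) (out : Int) : Prop := out = get_binary_col_alt s lower upper
instance (s : String) (lower : Int) (upper : Int) (out : Int) : Decidable (Spec_get_binary_col s lower upper out) := by unfold Spec_get_binary_col; infer_instance

-- ===== CLAIM (what is proved, stated in full; the proofs are below) =====
def Claim_equal_get_binary_col : Prop := ∀ (s : String) (lower : Int) (upper : Int), Dom_get_binary_col s lower upper → Pre_get_binary_col s lower upper → Spec_get_binary_col s lower upper (get_binary_col s lower upper)

-- ===== LEMMAS AND PROOFS =====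

-- B's body after the two single-char base cases, as a function of the char list
def altBody (cs : List Char) (lower upper : Int) : Int :=
  match get_binary_col_loop cs.dropLast lower upper with
  | none => 0
  | some (lo, hi) =>
    match cs.getLast? with
    | none => 0
    | some c => if c = 'L' then lo else if c = 'R' then hi else 0

lemma altBody_single (c : Char) (lower upper : Int) :
    altBody [c] lower upper = if c = 'L' then lower else if c = 'R' then upper else 0 := by
  simp [altBody, get_binary_col_loop]

lemma altBody_cons (c : Char) (cs : List Char) (h : cs ≠ []) (lower upper : Int) :
    altBody (c :: cs) lower upper =
      if c = 'L' then altBody cs lower (get_middle lower upper)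
      else if c = 'R' then altBody cs (get_middle lower upper + 1) upper
      else 0 := by
  obtain ⟨c', rest, rfl⟩ := List.exists_cons_of_ne_nil h
  unfold altBody
  by_cases hL : c = 'L' <;> by_cases hR : c = 'R' <;>
    simp [hL, hR, get_binary_col_loop, List.getLast?_cons_cons]

lemma rec_eq_altBody : ∀ (cs : List Char) (lower upper : Int), cs ≠ [] →
    (∀ c ∈ cs, c = 'L' ∨ c = 'R') →
    get_binary_col_rec cs lower upper = altBody cs lower upper := by
  intro cs
  induction cs with
  | nil => intro _ _ h; exact absurd rfl h
  | cons c rest ih =>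
    intro lower upper _ hall
    rcases List.eq_nil_or_concat rest with hrest | _
    · subst hrest
      rcases hall c (by simp) with hc | hc <;>
        simp [get_binary_col_rec, altBody_single, hc]
    · have hne : rest ≠ [] := by rintro rfl; simp_all
      have hall' : ∀ x ∈ rest, x = 'L' ∨ x = 'R' := fun x hx => hall x (by simp [hx])
      rw [altBody_cons c rest hne]
      rcases hall c (by simp) with hc | hc <;>
        simp [get_binary_col_rec, hc, hne, ih _ _ hne hall']

-- ===== VERDICT (by name: the statement is the Claim_ definition above) =====
theorem get_binary_col_spec : Claim_equal_get_binary_col := by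
  intro s lower upper _ hpre
  obtain ⟨hne, hallb⟩ := hpre
  have hall : ∀ c ∈ s.toList, c = 'L' ∨ c = 'R' := by
    intro c hc
    have := List.all_eq_true.mp hallb c hc
    simpa using this
  unfold Spec_get_binary_col get_binary_col get_binary_col_alt
  by_cases hL : s.toList = ['L']
  · simp [hL, get_binary_col_rec]
  · by_cases hR : s.toList = ['R']
    · simp [hR, get_binary_col_rec]
    · simp only [hL, hR, if_false]
      rw [rec_eq_altBody s.toList lower upper hne hall]
      rfl
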